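-- pv_equiv track=rewrite | github.com/AlexandreDecan/multiwords | words.py | is_unbordered
-- ===== SOURCE A (Python) =====
-- def proper_prefixes(word):
--     """ Return a list of nonempty proper prefixes of
--     the given word (sorted in increasing length). """
--     return [word[:i] for i in range(1, len(word))]
--
-- def proper_suffixes(word):
--     """ Return a list of nonempty proper suffixes
--     of the given word (sorted in decreasing length). """
--     return [word[i:] for i in range(1, len(word))]
--
-- def is_unbordered(word):
--     """ Return True iff word is unbordered. """
--     _suffixes = proper_suffixes(word)
--     _prefixes = proper_prefixes(word)
--     length = len(word)
--     # Number of suffixes and prefixes is the same as |w| - 1.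
--     for i in range(length - 1):
--         if _prefixes[i] == _suffixes[length - i - 2]:
--             return False
--     return True
-- ===== SOURCE B (Python) =====
-- def is_unbordered(word):
--     """ Return True iff word is unbordered. """
--     n = len(word)
--     if n < 2:
--         return True
--     # KMP prefix (failure) function: pi[i] = length of the longest proper
--     # border of word[:i+1]; word is unbordered iff pi[n-1] == 0.
--     pi = [0] * n
--     k = 0
--     for i in range(1, n):
--         while k > 0 and word[i] != word[k]:
--             k = pi[k - 1]
--         if word[i] == word[k]:
--             k += 1
--         pi[i] = k
--     return pi[n - 1] == 0
-- ===== Notes on version B (the rewrite author's own statement) =====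
-- stated objective: faster
-- what changed: Replaces A's quadratic scheme (materialize every proper prefix and suffix, then compare each prefix with the equally long suffix) by the KMP prefix (failure) function computed in one pass: the word is unbordered iff the last prefix-function value is 0.
import Mathlib
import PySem

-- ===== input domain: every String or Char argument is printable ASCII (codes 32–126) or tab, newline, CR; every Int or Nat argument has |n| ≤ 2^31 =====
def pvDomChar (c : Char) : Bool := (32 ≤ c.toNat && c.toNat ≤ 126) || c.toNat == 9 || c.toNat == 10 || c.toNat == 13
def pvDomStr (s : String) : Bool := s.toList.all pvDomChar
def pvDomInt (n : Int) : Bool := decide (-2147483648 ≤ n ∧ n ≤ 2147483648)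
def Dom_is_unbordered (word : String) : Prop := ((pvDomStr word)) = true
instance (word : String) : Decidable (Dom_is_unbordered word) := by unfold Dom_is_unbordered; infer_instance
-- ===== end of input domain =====

-- B replaces A's quadratic build-all-prefixes-and-suffixes scan by the KMP prefix
-- (failure) function: the word is unbordered iff the last prefix-function value is 0.

-- ===== PORT A =====
-- the for-loop of A: returns False on the first i with _prefixes[i] == _suffixes[length-i-2]
def isUnbLoopA (prefixes suffixes : List (List Char)) (length : Int) : List Int → Bool
  | [] => true
  | i :: rest =>
    if PySem.List.pyGetD prefixes i [] = PySem.List.pyGetD suffixes (length - i - 2) [] then false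
    else isUnbLoopA prefixes suffixes length rest

def is_unbordered (word : String) : Bool :=
  let s := word.toList
  -- proper_suffixes(word): [word[i:] for i in range(1, len(word))]
  let suffixes := (PySem.List.pyRange 1 (s.length : Int) 1).map
    (fun i => PySem.List.slice s (some i) none)
  -- proper_prefixes(word): [word[:i] for i in range(1, len(word))]
  let prefixes := (PySem.List.pyRange 1 (s.length : Int) 1).map
    (fun i => PySem.List.slice s none (some i))
  let length : Int := s.length
  -- indices i and length-i-2 are always in range, so pyGetD is exact here
  isUnbLoopA prefixes suffixes length (PySem.List.pyRange 0 (length - 1) 1)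

-- ===== PORT B =====
-- the while-loop 'while k > 0 and word[i] != word[k]: k = pi[k-1]'; the fuel is the
-- initial k: exact, since k strictly decreases at every iteration (pi[k-1] < k)
def kmpWhile (s : List Char) (pi : List Nat) (c : Char) : Nat → Nat → Nat
  | 0, k => k
  | fuel + 1, k =>
    if 0 < k ∧ c ≠ s.getD k 'A' then kmpWhile s pi c fuel (pi.getD (k - 1) 0)
    else k

-- one iteration of the for-loop body of Source B (state: the pi list built so far, k);
-- Source B assigns pi[i] = k for i = 1..n-1 in order, rendered here as appending
def kmpStep (s : List Char) (st : List Nat × Nat) (i : Nat) : List Nat × Nat :=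
  let c := s.getD i 'A'
  let k1 := kmpWhile s st.1 c st.2 st.2
  let k2 := if c = s.getD k1 'A' then k1 + 1 else k1
  (st.1 ++ [k2], k2)

def is_unbordered_alt (word : String) : Bool :=
  let s := word.toList
  let n := s.length
  if n < 2 then true
  else
    let st := (List.range' 1 (n - 1)).foldl (kmpStep s) ([0], 0)
    st.1.getD (n - 1) 0 == 0

-- ===== PRECONDITION & SPEC =====
def Spec_is_unbordered (word : String) (out : Bool) : Prop := out = is_unbordered_alt word
instance (word : String) (out : Bool) : Decidable (Spec_is_unbordered word out) := by unfold Spec_is_unbordered; infer_instance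

-- ===== CLAIM (what is proved, stated in full; the proofs are below) =====
def Claim_equal_is_unbordered : Prop := ∀ (word : String), Dom_is_unbordered word → Spec_is_unbordered word (is_unbordered word)

-- ===== LEMMAS AND PROOFS =====

-- 'l is a border length of s': a proper prefix of length l that is also a suffix
def bl (s : List Char) (l : Nat) : Bool :=
  decide (l < s.length) && (s.take l == s.drop (s.length - l))

-- the length of the longest border of s (0 if none)
def maxB (s : List Char) : Nat := Nat.findGreatest (fun l => bl s l = true) s.length

theorem bl_pw (s : List Char) (l : Nat) :
    bl s l = true ↔ l < s.length ∧ ∀ i, i < l → s.getD i 'A' = s.getD (i + (s.length - l)) 'A' := by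
  unfold bl
  simp only [Bool.and_eq_true, decide_eq_true_eq, beq_iff_eq]
  refine and_congr_right fun hl => ?_
  constructor
  · intro h i hi
    have h1 : (s.take l)[i]? = (s.drop (s.length - l))[i]? := by rw [h]
    rw [List.getElem?_take, List.getElem?_drop] at h1
    simp [hi] at h1
    rw [List.getD_eq_getElem?_getD, List.getD_eq_getElem?_getD, Nat.add_comm, h1]
  · intro h
    apply List.ext_getElem
    · simp; omega
    · intro i h1 h2
      have hi : i < l := by simp at h1; omega
      have h3 := h i hi
      rw [List.getD_eq_getElem?_getD, List.getD_eq_getElem?_getD,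
        List.getElem?_eq_getElem (by omega), List.getElem?_eq_getElem (by omega)] at h3
      simp only [Option.getD_some] at h3
      rw [List.getElem_take, List.getElem_drop]
      rw [h3]
      congr 1
      omega

theorem bl_lt {s : List Char} {l : Nat} (h : bl s l = true) : l < s.length :=
  ((bl_pw s l).1 h).1

theorem bl_zero {s : List Char} (h : s ≠ []) : bl s 0 = true := by
  rw [bl_pw]
  refine ⟨by cases s <;> simp_all, by omega⟩


theorem getD_take' (s : List Char) (k i : Nat) (d : Char) (h : i < k) :
    (s.take k).getD i d = s.getD i d := by
  by_cases hi : i < s.length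
  · rw [List.getD_eq_getElem (hn := by simp; omega), List.getD_eq_getElem (hn := hi),
      List.getElem_take]
  · rw [List.getD_eq_default _ _ (by simp; omega), List.getD_eq_default _ _ (by omega)]

theorem bl_trans {s : List Char} {k j : Nat} (hk : bl s k = true)
    (hj : bl (s.take k) j = true) : bl s j = true := by
  have hkn := bl_lt hk
  have hjk : j < k := by have := bl_lt hj; simp at this; omega
  rw [bl_pw] at hk hj ⊢
  obtain ⟨-, hk⟩ := hk
  obtain ⟨-, hj⟩ := hj
  refine ⟨by omega, fun i hi => ?_⟩
  have t1 := hj i hi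
  rw [show (List.take k s).length = k by simp; omega] at t1
  rw [getD_take' _ _ _ _ (by omega), getD_take' _ _ _ _ (by omega)] at t1
  have t2 := hk (i + (k - j)) (by omega)
  rw [t1, t2]
  congr 1
  omega

theorem bl_down {s : List Char} {k j : Nat} (hk : bl s k = true) (hj : bl s j = true)
    (hjk : j < k) : bl (s.take k) j = true := by
  have hkn := bl_lt hk
  rw [bl_pw] at hk hj ⊢
  obtain ⟨-, hk⟩ := hk
  obtain ⟨-, hj⟩ := hj
  refine ⟨by simp; omega, fun i hi => ?_⟩
  rw [show (List.take k s).length = k by simp; omega]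
  rw [getD_take' _ _ _ _ (by omega), getD_take' _ _ _ _ (by omega)]
  have t1 := hj i (by omega)
  have t2 := hk (i + (k - j)) (by omega)
  rw [show i + (k - j) + (s.length - k) = i + (s.length - j) by omega] at t2
  rw [t1, ← t2]

theorem getD_snoc_lt (p : List Char) (c : Char) {i : Nat} (d : Char) (h : i < p.length) :
    (p ++ [c]).getD i d = p.getD i d := List.getD_append _ _ _ _ h

theorem getD_snoc_last (p : List Char) (c : Char) (d : Char) :
    (p ++ [c]).getD p.length d = c := by
  rw [List.getD_eq_getElem (hn := by simp)]
  simp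

theorem bl_snoc (p : List Char) (c : Char) (l : Nat) :
    bl (p ++ [c]) (l + 1) = true ↔ (bl p l = true ∧ p.getD l 'A' = c) := by
  rw [bl_pw, bl_pw]
  simp only [List.length_append, List.length_cons, List.length_nil]
  constructor
  · rintro ⟨h1, h2⟩
    have hl : l < p.length := by omega
    refine ⟨⟨hl, fun i hi => ?_⟩, ?_⟩
    · have t := h2 i (by omega)
      rw [getD_snoc_lt _ _ _ (by omega)] at t
      rw [show i + (p.length + 1 - (l + 1)) = i + (p.length - l) by omega] at t
      rw [getD_snoc_lt _ _ _ (by omega)] at t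
      exact t
    · have t := h2 l (by omega)
      rw [getD_snoc_lt _ _ _ (by omega)] at t
      rw [show l + (p.length + 1 - (l + 1)) = p.length by omega] at t
      rw [getD_snoc_last] at t
      exact t
  · rintro ⟨⟨hl, h1⟩, h2⟩
    refine ⟨by omega, fun i hi => ?_⟩
    rcases Nat.lt_or_ge i l with hil | hil
    · rw [getD_snoc_lt _ _ _ (by omega), getD_snoc_lt _ _ _ (by omega),
        show i + (p.length + 1 - (l + 1)) = i + (p.length - l) by omega]
      exact h1 i hil
    · have : i = l := by omega
      subst this
      rw [getD_snoc_lt _ _ _ (by omega),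
        show i + (p.length + 1 - (i + 1)) = p.length by omega, getD_snoc_last]
      exact h2

theorem maxB_bl {s : List Char} (h : s ≠ []) : bl s (maxB s) = true := by
  unfold maxB
  exact Nat.findGreatest_spec (P := fun l => bl s l = true) (Nat.zero_le _) (bl_zero h)

theorem le_maxB {s : List Char} {l : Nat} (h : bl s l = true) : l ≤ maxB s := by
  unfold maxB
  exact Nat.le_findGreatest (le_of_lt (bl_lt h)) h

theorem maxB_lt {s : List Char} (h : s ≠ []) : maxB s < s.length := bl_lt (maxB_bl h)

theorem maxB_eq_zero_iff {s : List Char} : maxB s = 0 ↔ ∀ l, bl s l = true → l = 0 := by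
  constructor
  · intro h l hl
    have := le_maxB hl
    omega
  · intro h
    by_cases hs : s = []
    · subst hs
      simp [maxB]
    · exact h _ (maxB_bl hs)

theorem maxB_short {s : List Char} (h : s.length ≤ 1) : maxB s = 0 :=
  maxB_eq_zero_iff.2 fun l hl => by have := bl_lt hl; omega

def KInv (s : List Char) (pi : List Nat) (i : Nat) : Prop :=
  pi.length = i ∧ ∀ j, j < i → pi.getD j 0 = maxB (s.take (j + 1))

-- the while-then-if body computes the longest border of (s.take i) ++ [s[i]]
theorem kmp_while_step (s : List Char) (pi : List Nat) (i : Nat)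
    (hi : 1 ≤ i) (hin : i < s.length) (hInv : KInv s pi i) :
    ∀ fuel k, k ≤ fuel →
      bl (s.take i) k = true →
      (∀ l, bl (s.take i ++ [s.getD i 'A']) l = true → l ≤ k + 1) →
      (if s.getD i 'A' = s.getD (kmpWhile s pi (s.getD i 'A') fuel k) 'A'
       then kmpWhile s pi (s.getD i 'A') fuel k + 1
       else kmpWhile s pi (s.getD i 'A') fuel k) =
        maxB (s.take i ++ [s.getD i 'A']) := by
  have hplen : (s.take i).length = i := by simp; omega
  have hpne : s.take i ≠ [] := by
    intro h
    rw [h] at hplen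
    simp at hplen
    omega
  -- the exit state: ¬(0 < k ∧ c ≠ s[k]) and invariants ⇒ the if computes maxB q
  have exit : ∀ k, bl (s.take i) k = true →
      (∀ l, bl (s.take i ++ [s.getD i 'A']) l = true → l ≤ k + 1) →
      ¬(0 < k ∧ s.getD i 'A' ≠ s.getD k 'A') →
      (if s.getD i 'A' = s.getD k 'A' then k + 1 else k) =
        maxB (s.take i ++ [s.getD i 'A']) := by
    intro k hbk hup hcond
    have hki : k < i := by have := bl_lt hbk; omega
    by_cases hc : s.getD i 'A' = s.getD k 'A'
    · rw [if_pos hc]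
      have hq : bl (s.take i ++ [s.getD i 'A']) (k + 1) = true :=
        (bl_snoc _ _ _).2 ⟨hbk, by rw [getD_take' _ _ _ _ hki]; exact hc.symm⟩
      have h1 := le_maxB hq
      have h2 := hup _ (maxB_bl (by simp))
      omega
    · have hk0 : k = 0 := by
        by_contra h0
        exact hcond ⟨by omega, hc⟩
      subst hk0
      rw [if_neg hc]
      symm
      rw [maxB_eq_zero_iff]
      intro l hl
      rcases l with _ | j
      · rfl
      · exfalso
        have hj : j = 0 := by have := hup _ hl; omega
        subst hj
        obtain ⟨-, h2⟩ := (bl_snoc _ _ _).1 hl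
        rw [getD_take' _ _ _ _ (by omega)] at h2
        exact hc h2.symm
  intro fuel
  induction fuel with
  | zero =>
    intro k hk hbk hup
    have hk0 : k = 0 := by omega
    subst hk0
    exact exit 0 hbk hup (by simp)
  | succ fuel IH =>
    intro k hk hbk hup
    by_cases hcond : 0 < k ∧ s.getD i 'A' ≠ s.getD k 'A'
    · have hkpos : 0 < k := hcond.1
      have hki : k < i := by have := bl_lt hbk; omega
      simp only [kmpWhile, if_pos hcond]
      have htk : (s.take i).take k = s.take k := by rw [List.take_take]; simp; omega
      have hk1 : pi.getD (k - 1) 0 = maxB (s.take k) := by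
        have := hInv.2 (k - 1) (by omega)
        rwa [show k - 1 + 1 = k by omega] at this
      have hklen : (s.take k).length = k := by simp; omega
      have hkne : s.take k ≠ [] := by
        intro h
        rw [h] at hklen
        simp at hklen
        omega
      have hmlt : maxB (s.take k) < k := by have := maxB_lt hkne; omega
      have hbk' : bl (s.take i) (pi.getD (k - 1) 0) = true := by
        rw [hk1]
        exact bl_trans hbk (by rw [htk]; exact maxB_bl hkne)
      refine IH _ (by rw [hk1]; omega) hbk' ?_
      intro l hl
      rcases l with _ | j
      · omega
      · obtain ⟨hbj, hpj⟩ := (bl_snoc _ _ _).1 hl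
        have hjk : j < k := by
          have hjle : j + 1 ≤ k + 1 := hup _ hl
          rcases Nat.lt_or_ge j k with h | h
          · exact h
          · exfalso
            have : j = k := by omega
            subst this
            rw [getD_take' _ _ _ _ hki] at hpj
            exact hcond.2 hpj.symm
        have : bl (s.take k) j = true := by rw [← htk]; exact bl_down hbk hbj hjk
        have := le_maxB this
        rw [hk1]
        omega
    · simp only [kmpWhile, if_neg hcond]
      exact exit k hbk hup hcond

theorem take_snoc (s : List Char) (i : Nat) (h : i < s.length) :
    s.take i ++ [s.getD i 'A'] = s.take (i + 1) := by
  rw [List.getD_eq_getElem _ _ h, List.take_add_one, List.getElem?_eq_getElem h]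
  rfl

theorem kmp_fold (s : List Char) (hn : 2 ≤ s.length) :
    ∀ j, j ≤ s.length - 1 →
      (List.range' 1 j).foldl (kmpStep s) ([0], 0) =
        ((List.range (j + 1)).map (fun t => maxB (s.take (t + 1))), maxB (s.take (j + 1))) := by
  intro j
  induction j with
  | zero =>
    intro _
    simp [List.range_succ, maxB_short (s := s.take 1) (by simp)]
  | succ j ih =>
    intro hj
    have hjn : j + 1 < s.length := by omega
    have hplen : (s.take (j + 1)).length = j + 1 := by simp; omega
    have hpne : s.take (j + 1) ≠ [] := by
      intro h
      rw [h] at hplen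
      simp at hplen
    rw [List.range'_concat, List.foldl_append, ih (by omega)]
    have hstep := kmp_while_step s ((List.range (j + 1)).map (fun t => maxB (s.take (t + 1))))
      (j + 1) (by omega) hjn
      ⟨by simp, ?_⟩ (maxB (s.take (j + 1))) (maxB (s.take (j + 1))) le_rfl
      (maxB_bl hpne) ?_
    · show kmpStep s _ (1 + 1 * j) = _
      rw [show 1 + 1 * j = j + 1 by omega]
      unfold kmpStep
      simp only []
      rw [hstep, take_snoc s (j + 1) hjn]
      simp [List.range_succ]
    · intro t ht
      rw [List.getD_eq_getElem (hn := by simpa using ht), List.getElem_map, List.getElem_range]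
    · intro l hl
      rcases l with _ | j'
      · omega
      · obtain ⟨hbj, -⟩ := (bl_snoc _ _ _).1 hl
        have := le_maxB hbj
        omega

theorem alt_eq (word : String) : is_unbordered_alt word = (maxB word.toList == 0) := by
  unfold is_unbordered_alt
  by_cases h : word.toList.length < 2
  · rw [if_pos h]
    rw [maxB_short (by omega)]
    rfl
  · rw [if_neg h]
    have hn : 2 ≤ word.toList.length := by omega
    rw [kmp_fold _ hn (word.toList.length - 1) le_rfl]
    simp only []
    have hg : (List.map (fun t => maxB (List.take (t + 1) word.toList))
        (List.range (word.toList.length - 1 + 1))).getD (word.toList.length - 1) 0 =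
        maxB (List.take (word.toList.length - 1 + 1) word.toList) := by
      rw [List.getD_eq_getElem (n := word.toList.length - 1) (hn := by simp), List.getElem_map,
        List.getElem_range]
    rw [hg, show word.toList.length - 1 + 1 = word.toList.length by omega, List.take_length]

theorem loopA_iff (P S : List (List Char)) (L : Int) (rng : List Int) :
    isUnbLoopA P S L rng = true ↔
      ∀ i ∈ rng, PySem.List.pyGetD P i [] ≠ PySem.List.pyGetD S (L - i - 2) [] := by
  induction rng with
  | nil => simp [isUnbLoopA]
  | cons a t ih =>
    simp only [isUnbLoopA]
    by_cases h : PySem.List.pyGetD P a [] = PySem.List.pyGetD S (L - a - 2) []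
    · rw [if_pos h]
      simp only [Bool.false_eq_true, false_iff]
      intro hall
      exact hall a List.mem_cons_self h
    · rw [if_neg h, ih]
      simp [h]

theorem a_iff (word : String) : is_unbordered word = true ↔ maxB word.toList = 0 := by
  unfold is_unbordered
  simp only []
  rcases Nat.eq_zero_or_pos word.toList.length with h0 | hpos
  · have hnil : word.toList = [] := List.eq_nil_of_length_eq_zero h0
    rw [hnil]
    rw [show PySem.List.pyRange 0 ((([] : List Char).length : Int) - 1) 1 = [] from by decide]
    simp only [isUnbLoopA, true_iff]
    exact maxB_short (by simp)
  · rw [loopA_iff]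
    rw [show ((word.toList.length : Int) - 1) = ((word.toList.length - 1 : Nat) : Int) by omega]
    rw [PySem.List.pyRange_zero_natCast]
    rw [List.forall_mem_map]
    constructor
    · intro hall
      rw [maxB_eq_zero_iff]
      intro l hl
      rcases l with _ | t
      · rfl
      · exfalso
        have hlt : t + 1 < word.toList.length := bl_lt hl
        have ht : t < word.toList.length - 1 := by omega
        have := hall t (List.mem_range.2 ht)
        apply this
        rw [PySem.List.pyGetD_map_pyRange_one _ 1 _ t [] (by omega),
          show (1 : Int) + (t : Int) = ((t + 1 : Nat) : Int) by omega,
          PySem.List.slice_to_natCast]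
        rw [show (word.toList.length : Int) - (t : Int) - 2
            = ((word.toList.length - t - 2 : Nat) : Int) by omega]
        rw [PySem.List.pyGetD_map_pyRange_one _ 1 _ (word.toList.length - t - 2) [] (by omega),
          show (1 : Int) + ((word.toList.length - t - 2 : Nat) : Int)
            = ((word.toList.length - t - 1 : Nat) : Int) by omega,
          PySem.List.slice_from_natCast]
        unfold bl at hl
        simp only [Bool.and_eq_true, decide_eq_true_eq, beq_iff_eq] at hl
        rw [show word.toList.length - t - 1 = word.toList.length - (t + 1) by omega]
        exact hl.2
    · intro hmax t htm
      have ht : t < word.toList.length - 1 := List.mem_range.1 htm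
      rw [PySem.List.pyGetD_map_pyRange_one _ 1 _ t [] (by omega),
        show (1 : Int) + (t : Int) = ((t + 1 : Nat) : Int) by omega,
        PySem.List.slice_to_natCast]
      rw [show (word.toList.length : Int) - (t : Int) - 2
          = ((word.toList.length - t - 2 : Nat) : Int) by omega]
      rw [PySem.List.pyGetD_map_pyRange_one _ 1 _ (word.toList.length - t - 2) [] (by omega),
        show (1 : Int) + ((word.toList.length - t - 2 : Nat) : Int)
          = ((word.toList.length - t - 1 : Nat) : Int) by omega,
        PySem.List.slice_from_natCast]
      intro heq
      have hbl : bl word.toList (t + 1) = true := by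
        unfold bl
        simp only [Bool.and_eq_true, decide_eq_true_eq, beq_iff_eq]
        refine ⟨by omega, ?_⟩
        rw [show word.toList.length - (t + 1) = word.toList.length - t - 1 by omega]
        exact heq
      have := le_maxB hbl
      omega

-- ===== VERDICT (by name: the statement is the Claim_ definition above) =====
theorem is_unbordered_spec : Claim_equal_is_unbordered := by
  intro word _
  unfold Spec_is_unbordered
  rw [alt_eq, Bool.eq_iff_iff, a_iff, beq_iff_eq]
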